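-- pv_equiv track=rewrite | github.com/saj9191/ripple | pywren/graph.py | cumulative
-- ===== SOURCE A (Python) =====
-- def cumulative(ranges, min_time):
--   ranges.sort()
--   cum = []
--   num = 0
--   for [time, r] in ranges:
--     num += r
--     cum.append([time - min_time, num])
--   return cum
-- ===== SOURCE B (Python) =====
-- def cumulative(ranges, min_time):
--   # Same in-place sort side effect as A; return value built back-to-front
--   # from the grand total, subtracting each range on the way.
--   ranges.sort()
--   total = sum(r for _, r in ranges)
--   out = []
--   for time, r in reversed(ranges):
--     out.append([time - min_time, total])
--     total -= r
--   out.reverse()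
--   return out
-- ===== Notes on version B (the rewrite author's own statement) =====
-- stated objective: alternative
-- what changed: B replaces A's fused forward running-sum loop by computing the grand total first and then building the output back-to-front over the reversed sorted list, subtracting each range; the result is reversed at the end.
import Mathlib
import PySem

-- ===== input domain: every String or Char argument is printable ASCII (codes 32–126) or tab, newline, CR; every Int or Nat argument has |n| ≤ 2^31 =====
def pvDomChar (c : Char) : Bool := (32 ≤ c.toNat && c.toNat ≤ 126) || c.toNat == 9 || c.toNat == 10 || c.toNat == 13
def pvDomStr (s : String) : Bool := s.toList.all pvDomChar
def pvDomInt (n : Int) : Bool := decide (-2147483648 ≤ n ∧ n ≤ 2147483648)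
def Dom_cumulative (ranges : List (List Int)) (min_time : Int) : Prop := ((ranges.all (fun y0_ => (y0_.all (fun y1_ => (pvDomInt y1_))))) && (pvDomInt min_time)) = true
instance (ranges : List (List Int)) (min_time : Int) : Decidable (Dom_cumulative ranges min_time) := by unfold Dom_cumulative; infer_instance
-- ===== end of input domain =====

-- ===== PORT A =====
-- B differs from A's single fused running-sum loop: B computes the grand total
-- first and builds the output back-to-front, subtracting each range (objective:
-- alternative). Both A and B sort `ranges` in place; the claim is about the
-- return value (the mutation is identical in both).
def cumulative (ranges : List (List Int)) (min_time : Int) : List (List Int) :=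
  let s := PySem.List.sorted ranges (fun x => x) false
  (s.foldl (fun (st : Int × List (List Int)) l =>
      match l with
      | [time, r] => (st.1 + r, st.2 ++ [[time - min_time, st.1 + r]])
      | _ => st  -- Python raises ValueError unpacking here; excluded by Pre_
    ) (0, [])).2

-- ===== PORT B =====
-- total = sum(r for _, r in ranges)  (ranges already sorted in place)
def pvSumSecond (l : List (List Int)) : Int :=
  -- the `_, r` unpacking succeeds exactly on length-2 elements (Pre_); elsewhere Python raises ValueError
  (l.map (fun x => if x.length = 2 then (x.drop 1).headD 0 else 0)).sum

def cumulative_alt (ranges : List (List Int)) (min_time : Int) : List (List Int) :=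
  let s := PySem.List.sorted ranges (fun x => x) false
  let total := pvSumSecond s
  -- `time, r = l` succeeds exactly on length-2 elements (Pre_); elsewhere Python raises ValueError
  ((s.reverse.foldl (fun (st : Int × List (List Int)) l =>
      if l.length = 2 then
        let time := l.headD 0
        let r := (l.drop 1).headD 0
        (st.1 - r, st.2 ++ [[time - min_time, st.1]])
      else st
    ) (total, [])).2).reverse

-- ===== PRECONDITION & SPEC =====
-- Pre_ excludes exactly the inputs on which A (and B) raise ValueError: an
-- element that is not a length-2 list cannot be unpacked as [time, r].
def Pre_cumulative (ranges : List (List Int)) (min_time : Int) : Prop :=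
  ∀ l ∈ ranges, l.length = 2
instance (ranges : List (List Int)) (min_time : Int) : Decidable (Pre_cumulative ranges min_time) := by unfold Pre_cumulative; infer_instance

def pvWitness_cumulative : List (List Int) × Int := ([[5, 2], [3, 4]], 1)

def Spec_cumulative (ranges : List (List Int)) (min_time : Int) (out : List (List Int)) : Prop := out = cumulative_alt ranges min_time
instance (ranges : List (List Int)) (min_time : Int) (out : List (List Int)) : Decidable (Spec_cumulative ranges min_time out) := by unfold Spec_cumulative; infer_instance

-- ===== CLAIM (what is proved, stated in full; the proofs are below) =====
def Claim_equal_cumulative : Prop := ∀ (ranges : List (List Int)) (min_time : Int), Dom_cumulative ranges min_time → Pre_cumulative ranges min_time → Spec_cumulative ranges min_time (cumulative ranges min_time)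

-- ===== LEMMAS AND PROOFS =====

-- reference recursion: the cumulative list produced from a sorted list,
-- starting the running total at `num`
def cumSpec (m num : Int) : List (List Int) → List (List Int)
  | [] => []
  | [t, r] :: rest => [t - m, num + r] :: cumSpec m (num + r) rest
  | _ :: rest => cumSpec m num rest

theorem cumA_foldl (m : Int) (l : List (List Int)) (h : ∀ x ∈ l, x.length = 2) :
    ∀ (num : Int) (acc : List (List Int)),
      (l.foldl (fun (st : Int × List (List Int)) x =>
        match x with
        | [time, r] => (st.1 + r, st.2 ++ [[time - m, st.1 + r]])
        | _ => st) (num, acc)).2 = acc ++ cumSpec m num l := by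
  induction l with
  | nil => intro num acc; simp [cumSpec]
  | cons hd tl ih =>
    intro num acc
    have hhd : hd.length = 2 := h hd (by simp)
    match hd, hhd with
    | [t, r], _ =>
      simp only [List.foldl_cons]
      rw [ih (fun x hx => h x (by simp [hx]))]
      simp [cumSpec]

theorem cumB_foldl (m : Int) (l : List (List Int)) (h : ∀ x ∈ l, x.length = 2) :
    ∀ num : Int,
      l.reverse.foldl (fun (st : Int × List (List Int)) x =>
        if x.length = 2 then
          let time := x.headD 0
          let r := (x.drop 1).headD 0
          (st.1 - r, st.2 ++ [[time - m, st.1]])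
        else st) (num + pvSumSecond l, []) = (num, (cumSpec m num l).reverse) := by
  induction l with
  | nil => intro num; simp [pvSumSecond, cumSpec]
  | cons hd tl ih =>
    intro num
    have hhd : hd.length = 2 := h hd (by simp)
    match hd, hhd with
    | [t, r], _ =>
      have hsum : num + pvSumSecond ([t, r] :: tl) = (num + r) + pvSumSecond tl := by
        simp [pvSumSecond]; ring
      rw [hsum]
      simp only [List.reverse_cons, List.foldl_append]
      rw [ih (fun x hx => h x (by simp [hx])) (num + r)]
      simp [cumSpec]

-- ===== VERDICT (by name: the statement is the Claim_ definition above) =====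
theorem cumulative_spec : Claim_equal_cumulative := by
  intro ranges m _ hpre
  have hmem : ∀ x ∈ PySem.List.sorted ranges (fun x => x) false, x.length = 2 := by
    intro x hx
    exact hpre x ((PySem.List.mem_sorted _ _ _ _).1 hx)
  unfold Spec_cumulative cumulative cumulative_alt
  simp only []
  rw [cumA_foldl m _ hmem 0 []]
  have := cumB_foldl m (PySem.List.sorted ranges (fun x => x) false) hmem 0
  rw [zero_add] at this
  rw [this]
  simp
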